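-- pv_equiv track=rewrite | github.com/EliotBD03/BabaIsYou | prototype/BabaIsYouJULIEN.py | listetostr
-- ===== SOURCE A (Python) =====
-- def listetostr(carte):
--     res = ''
--     indice = 0
--     for elem in carte:
--         res += elem
--         indice += 1
--         if indice % 10 == 0:
--             res += '\n'
--     return res
-- ===== SOURCE B (Python) =====
-- def listetostr(carte):
--     chunks = [''.join(carte[i:i+10]) for i in range(0, len(carte), 10)]
--     res = '\n'.join(chunks)
--     if carte and len(carte) % 10 == 0:
--         res += '\n'
--     return res
-- ===== Notes on version B (the rewrite author's own statement) =====
-- stated objective: idiomatic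
-- what changed: Replaces the element-by-element loop with a running newline counter by slicing the list into 10-element chunks, joining each chunk and the chunks with '\n', restoring the trailing newline when the length is a positive multiple of 10.
import Mathlib
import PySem

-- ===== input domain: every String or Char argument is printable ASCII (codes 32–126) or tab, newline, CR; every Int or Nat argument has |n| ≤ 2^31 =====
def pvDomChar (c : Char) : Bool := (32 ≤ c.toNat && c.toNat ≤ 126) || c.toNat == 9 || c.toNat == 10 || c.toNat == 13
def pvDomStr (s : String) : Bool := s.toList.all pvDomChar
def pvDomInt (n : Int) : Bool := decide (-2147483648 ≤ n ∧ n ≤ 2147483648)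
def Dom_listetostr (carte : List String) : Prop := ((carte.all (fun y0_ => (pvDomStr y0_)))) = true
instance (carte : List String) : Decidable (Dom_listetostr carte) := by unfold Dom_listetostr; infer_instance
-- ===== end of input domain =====

-- B replaces A's element-by-element loop (running counter, newline every 10th element) by
-- slicing into 10-element chunks joined with '\n' (plus the trailing newline A emits when
-- the length is a positive multiple of 10); same cost, more idiomatic.

-- ===== PORT A =====
-- the for-loop of A, as structural recursion over the same state (res, indice)
def listetostrLoop : List String → String → Int → String
  | [], res, _ => res
  | e :: rest, res, ind =>
      let res1 := res ++ e
      let ind1 := ind + 1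
      if PySem.Int.mod ind1 10 = 0 then listetostrLoop rest (res1 ++ "\n") ind1
      else listetostrLoop rest res1 ind1

def listetostr (carte : List String) : String := listetostrLoop carte "" 0

-- ===== PORT B =====
def listetostr_alt (carte : List String) : String :=
  let n : Int := carte.length
  let chunks := (PySem.List.pyRange 0 n 10).map
    (fun i => PySem.Str.join "" (PySem.List.slice carte (some i) (some (i + 10))))
  let res := PySem.Str.join "\n" chunks
  if (!carte.isEmpty) && (PySem.Int.mod n 10 == 0) then res ++ "\n" else res

-- ===== PRECONDITION & SPEC =====
def Spec_listetostr (carte : List String) (out : String) : Prop := out = listetostr_alt carte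
instance (carte : List String) (out : String) : Decidable (Spec_listetostr carte out) := by unfold Spec_listetostr; infer_instance

-- ===== CLAIM (what is proved, stated in full; the proofs are below) =====
def Claim_equal_listetostr : Prop := ∀ (carte : List String), Dom_listetostr carte → Spec_listetostr carte (listetostr carte)

-- ===== LEMMAS AND PROOFS =====

theorem pvMod10 (a : Int) : PySem.Int.mod a 10 = a % 10 := by
  simp [PySem.Int.mod, Int.fmod_eq_emod]

theorem pvFlattenIntersperseNil : ∀ (L : List (List Char)),
    (List.intersperse ([] : List Char) L).flatten = L.flatten
  | [] => rfl
  | [a] => rfl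
  | a :: b :: t => by
      show (a :: [] :: List.intersperse [] (b :: t)).flatten = _
      simp [pvFlattenIntersperseNil (b :: t)]

-- ''.join as used by B
theorem sjoin_nil : PySem.Str.join "" [] = "" := by decide

theorem sjoin_cons (a : String) (l : List String) :
    PySem.Str.join "" (a :: l) = a ++ PySem.Str.join "" l := by
  apply String.toList_inj.mp
  simp [PySem.Str.toList_join, PySem.Chars.join, List.intercalate, String.toList_append,
    pvFlattenIntersperseNil]

theorem njoin_cons_ne (a : String) (l : List String) (h : l ≠ []) :
    PySem.Str.join "\n" (a :: l) = a ++ "\n" ++ PySem.Str.join "\n" l := by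
  obtain ⟨b, t, rfl⟩ := List.exists_cons_of_ne_nil h
  apply String.toList_inj.mp
  simp [PySem.Str.toList_join, PySem.Chars.join_cons_cons, String.toList_append]

-- A's loop: accumulator is a pure prefix
theorem loopA_prefix (c : List String) : ∀ (res : String) (i : Int),
    listetostrLoop c res i = res ++ listetostrLoop c "" i := by
  induction c with
  | nil => intro res i; simp [listetostrLoop]
  | cons e rest ih =>
      intro res i
      simp only [listetostrLoop]
      split
      · rw [ih (res ++ e ++ "\n"), ih ("" ++ e ++ "\n")]
        simp [String.append_assoc]
      · rw [ih (res ++ e), ih ("" ++ e)]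
        simp [String.append_assoc]

-- A's loop depends on the counter only through its residue mod 10
theorem loopA_mod (c : List String) : ∀ (i j : Int), i % 10 = j % 10 →
    listetostrLoop c "" i = listetostrLoop c "" j := by
  induction c with
  | nil => intro i j _; rfl
  | cons e rest ih =>
      intro i j h
      have h1 : (i + 1) % 10 = (j + 1) % 10 := by omega
      simp only [listetostrLoop, pvMod10, h1]
      split
      · rw [loopA_prefix rest ("" ++ e ++ "\n") (i+1), loopA_prefix rest ("" ++ e ++ "\n") (j+1),
            ih _ _ h1]
      · rw [loopA_prefix rest ("" ++ e) (i+1), loopA_prefix rest ("" ++ e) (j+1), ih _ _ h1]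

-- unrolling the first chunk of A's loop: at counter 10 - j the newline fires after j elements
theorem loopA_chunk (c : List String) : ∀ (j : Nat), 0 < j → j ≤ 10 →
    listetostrLoop c "" ((10 : Int) - j) =
      if j ≤ c.length then
        PySem.Str.join "" (c.take j) ++ "\n" ++ listetostrLoop (c.drop j) "" 0
      else PySem.Str.join "" c := by
  induction c with
  | nil =>
      intro j hj _
      simp only [listetostrLoop, List.length_nil]
      rw [if_neg (by omega), sjoin_nil]
  | cons e rest ih =>
      intro j hj hj10
      simp only [listetostrLoop, pvMod10]
      have harith : (10 : Int) - j + 1 = 10 - ((j : Int) - 1) := by omega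
      by_cases h1 : j = 1
      · subst h1
        rw [if_pos (by norm_num), loopA_prefix rest ("" ++ e ++ "\n") _,
          loopA_mod rest ((10 : Int) - (1:Nat) + 1) 0 (by norm_num)]
        have hlen : 1 ≤ (e :: rest).length := by simp
        simp [sjoin_cons, sjoin_nil, String.append_assoc]
      · have hj2 : 2 ≤ j := by omega
        have hmod : ((10 : Int) - j + 1) % 10 ≠ 0 := by omega
        simp only [if_neg hmod]
        rw [loopA_prefix rest ("" ++ e) ((10:Int) - j + 1), harith]
        have hcast : ((10 : Int) - ((j : Int) - 1)) = 10 - ((j - 1 : Nat) : Int) := by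
          omega
        have hA : 0 < j - 1 := by omega
        have hB : j - 1 ≤ 10 := by omega
        rw [hcast, ih (j - 1) hA hB]
        have hiff : j - 1 ≤ rest.length ↔ j ≤ (e :: rest).length := by
          simp only [List.length_cons]
          omega
        by_cases hlen : j - 1 ≤ rest.length
        · rw [if_pos hlen, if_pos (by simpa using hiff.mp hlen)]
          have htake : (e :: rest).take j = e :: rest.take (j - 1) := by
            cases j with
            | zero => omega
            | succ m => simp
          have hdrop : (e :: rest).drop j = rest.drop (j - 1) := by
            cases j with
            | zero => omega
            | succ m => simp
          rw [htake, hdrop, sjoin_cons]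
          simp [String.append_assoc]
        · rw [if_neg hlen, if_neg (fun h => hlen (hiff.mpr h))]
          rw [sjoin_cons]
          simp

-- A's chunk recurrence
theorem A_rec (c : List String) :
    listetostr c =
      if 10 ≤ c.length then
        PySem.Str.join "" (c.take 10) ++ "\n" ++ listetostr (c.drop 10)
      else PySem.Str.join "" c := by
  have h := loopA_chunk c 10 (by omega) (by omega)
  simpa [listetostr] using h

-- stepping pyRange 0 n 10 once (n > 0)
theorem pyRange_ten_step (n : Int) (hn : 0 < n) :
    PySem.List.pyRange 0 n 10 = 0 :: (PySem.List.pyRange 0 (n - 10) 10).map (· + 10) := by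
  rw [PySem.List.pyRange_of_pos 0 n (by omega), PySem.List.pyRange_of_pos 0 (n - 10) (by omega)]
  have hcount : (if (0:Int) < n then ((n - 0 + 10 - 1) / 10).toNat else 0) =
      (if (0:Int) < n - 10 then ((n - 10 - 0 + 10 - 1) / 10).toNat else 0) + 1 := by
    split <;> split <;> omega
  rw [hcount, List.range_succ_eq_map]
  simp [List.map_map, Function.comp]
  intro k _; ring

-- B's chunk recurrence
theorem B_rec (c : List String) :
    listetostr_alt c =
      if 10 ≤ c.length then
        PySem.Str.join "" (c.take 10) ++ "\n" ++ listetostr_alt (c.drop 10)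
      else PySem.Str.join "" c := by
  by_cases hnil : c = []
  · subst hnil
    simp [listetostr_alt, PySem.List.pyRange, sjoin_nil]
    decide
  · have hpos : 0 < c.length := List.length_pos_iff.mpr hnil
    have hchunk0 : PySem.Str.join "" (PySem.List.slice c (some 0) (some (0 + 10))) =
        PySem.Str.join "" (c.take 10) := by
      norm_num [PySem.List.slice_toNat c (a := 0) (b := 10) (by omega) (by omega)]
      rfl
    by_cases hbig : 10 < c.length
    · -- strictly more than one chunk
      have hshift : ∀ i ∈ PySem.List.pyRange 0 ((c.length : Int) - 10) 10,
          PySem.Str.join "" (PySem.List.slice c (some (i + 10)) (some (i + 10 + 10))) =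
          PySem.Str.join "" (PySem.List.slice (c.drop 10) (some i) (some (i + 10))) := by
        intro i hi
        have hi0 : 0 ≤ i := ((PySem.List.mem_pyRange_iff_of_pos (by omega) i).mp hi).1
        rw [PySem.List.slice_toNat c (by omega) (by omega),
            PySem.List.slice_toNat (c.drop 10) hi0 (by omega)]
        rw [List.drop_drop]
        have e1 : ((i + 10 : Int)).toNat = 10 + i.toNat := by omega
        have e2 : ((i + 10 + 10 : Int)).toNat - ((i + 10 : Int)).toNat = 10 := by omega
        have e3 : ((i + 10 : Int)).toNat - i.toNat = 10 := by omega
        rw [e2, e3, e1]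
      have hne : PySem.List.pyRange 0 ((c.length : Int) - 10) 10 ≠ [] := by
        have : (0 : Int) ∈ PySem.List.pyRange 0 ((c.length : Int) - 10) 10 := by
          rw [PySem.List.mem_pyRange_iff_of_pos (by omega)]
          refine ⟨le_refl _, by omega, ⟨0, by ring⟩⟩
        intro h; rw [h] at this; simp at this
      have hdroplen : ((c.drop 10).length : Int) = (c.length : Int) - 10 := by
        simp; omega
      have hdropnil : ¬ (c.drop 10).isEmpty := by
        simp [List.isEmpty_iff, List.drop_eq_nil_iff]; omega
      simp only [listetostr_alt, pyRange_ten_step (c.length : Int) (by exact_mod_cast hpos),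
        List.map_cons, List.map_map]
      have hmapeq :
          (PySem.List.pyRange 0 ((c.length : Int) - 10) 10).map
              ((fun i => PySem.Str.join "" (PySem.List.slice c (some i) (some (i + 10)))) ∘ (· + 10)) =
          (PySem.List.pyRange 0 (((c.drop 10).length : Int)) 10).map
              (fun i => PySem.Str.join "" (PySem.List.slice (c.drop 10) (some i) (some (i + 10)))) := by
        rw [hdroplen]
        apply List.map_congr_left
        intro i hi
        simpa using hshift i hi
      have hne' : PySem.List.pyRange 0 (((c.drop 10).length : Int)) 10 ≠ [] := by
        rw [hdroplen]; exact hne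
      rw [hmapeq, hchunk0,
          njoin_cons_ne _ _ (fun h => hne' (List.map_eq_nil_iff.mp h))]
      have hmodeq : PySem.Int.mod ((c.length : Int)) 10 = PySem.Int.mod ((c.drop 10).length : Int) 10 := by
        rw [pvMod10, pvMod10, hdroplen]; omega
      have hcne : ¬ c.isEmpty := by simp [List.isEmpty_iff, hnil]
      rw [if_pos (show 10 ≤ c.length by omega)]
      simp only [hcne, hdropnil, Bool.not_false, Bool.true_and, hmodeq]
      simp [String.append_assoc]
      split <;> rfl
    · -- exactly one chunk: 0 < length ≤ 10
      have hle : c.length ≤ 10 := by omega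
      have hn : (0:Int) < (c.length : Int) := by exact_mod_cast hpos
      have hr : PySem.List.pyRange 0 (c.length : Int) 10 = [0] := by
        rw [pyRange_ten_step _ hn, PySem.List.pyRange_of_pos 0 ((c.length:Int) - 10) (by omega)]
        have h10' : ¬ ((0:Int) < (c.length : Int) - 10) := by omega
        simp only [h10', if_false, List.range_zero, List.map_nil]
      have hce : c.isEmpty = false := by simp [hnil]
      have hLsingle : PySem.Str.join "\n"
          ((PySem.List.pyRange 0 ((c.length : Int)) 10).map
            (fun i => PySem.Str.join "" (PySem.List.slice c (some i) (some (i + 10))))) =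
          PySem.Str.join "" (c.take 10) := by
        rw [hr]
        simp only [List.map_cons, List.map_nil]
        apply String.toList_inj.mp
        rw [hchunk0]
        simp [PySem.Str.toList_join, PySem.Chars.join_singleton]
      by_cases h10 : c.length = 10
      · have hm : PySem.Int.mod ((c.length : Int)) 10 = 0 := by rw [pvMod10]; omega
        have hdrop : c.drop 10 = [] := List.drop_eq_nil_iff.mpr (by omega)
        have halt : listetostr_alt (c.drop 10) = "" := by rw [hdrop]; decide
        rw [if_pos (show 10 ≤ c.length by omega), halt]
        simp only [listetostr_alt]
        rw [hLsingle]
        simp only [hce, Bool.not_false, Bool.true_and, hm, beq_self_eq_true, if_true]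
        rw [String.append_empty]
      · have hmb : (PySem.Int.mod ((c.length : Int)) 10 == 0) = false := by
          rw [pvMod10]
          simp
          omega
        rw [if_neg (show ¬ 10 ≤ c.length by omega)]
        simp only [listetostr_alt]
        rw [hLsingle]
        simp only [hce, Bool.not_false, Bool.true_and, hmb]
        rw [List.take_of_length_le hle]
        simp

theorem A_eq_B : ∀ (c : List String), listetostr c = listetostr_alt c := by
  have key : ∀ (N : Nat) (c : List String), c.length ≤ N → listetostr c = listetostr_alt c := by
    intro N
    induction N with
    | zero =>
        intro c hc
        have : c = [] := by cases c <;> simp_all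
        subst this; decide
    | succ N ih =>
        intro c hc
        rw [A_rec c, B_rec c]
        by_cases h : 10 ≤ c.length
        · rw [ih (c.drop 10) (by simp; omega)]
        · rw [if_neg h, if_neg h]
  intro c; exact key c.length c le_rfl

-- ===== VERDICT (by name: the statement is the Claim_ definition above) =====
theorem listetostr_spec : Claim_equal_listetostr := by
  intro c _
  unfold Spec_listetostr
  exact A_eq_B c
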